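-- pv_equiv track=rewrite | github.com/bosima/color-trace | src/color-trace.py | get_nonpalette_color
-- ===== SOURCE A (Python) =====
-- def get_nonpalette_color(palette, start_from_black=True, avoid_colors=None):
--     """return a color hex string not listed in palette
--     返回一个不在调色板内的16进制颜色字符串
--
--     从黑色开始: 从黑色开始搜索颜色，否则从白色开始
--     规避颜色: 一个列表, 指定在搜索时需要规避的颜色
-- """
--     if avoid_colors is None:
--         final_palette = tuple(palette)
--     else:
--         final_palette = tuple(palette) + tuple(avoid_colors)
--     if start_from_black:
--         color_range = range(int('ffffff', 16))
--     else:
--         color_range = range(int('ffffff', 16), 0, -1)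
--     for i in color_range:
--         color = "#{0:06x}".format(i)
--         if color not in final_palette:
--             return color
--     # 当调色板加上规避颜色，包含所有颜色 #000000-#ffffff 时，抛出错误
--     raise Exception("未能找到调色板之外的颜色")
-- ===== SOURCE B (Python) =====
-- def get_nonpalette_color(palette, start_from_black=True, avoid_colors=None):
--     """return a color hex string not listed in palette
--     (index the relevant palette entries as integers, sort them and find the
--     first gap in the consecutive run, instead of testing candidates one by one)
--     """
--     entries = list(palette) if avoid_colors is None else list(palette) + list(avoid_colors)
--     occupied = set()
--     for s in entries:
--         if len(s) == 7 and s[0] == '#' and all(c in "0123456789abcdef" for c in s[1:]):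
--             occupied.add(int(s[1:], 16))
--     if start_from_black:
--         # search space is [0x000000, 0xfffffe]: minimum excludant via sorted gap scan
--         taken = sorted(v for v in occupied if v <= 0xfffffe)
--         expected = 0
--         for v in taken:
--             if v != expected:
--                 break
--             expected += 1
--         if expected <= 0xfffffe:
--             return "#{0:06x}".format(expected)
--     else:
--         # search space is [0x000001, 0xffffff]: maximum excludant via reverse-sorted gap scan
--         taken = sorted((v for v in occupied if 1 <= v), reverse=True)
--         expected = 0xffffff
--         for v in taken:
--             if v != expected:
--                 break
--             expected -= 1
--         if 1 <= expected:
--             return "#{0:06x}".format(expected)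
--     raise Exception("未能找到调色板之外的颜色")
-- ===== Notes on version B (the rewrite author's own statement) =====
-- stated objective: alternative
-- what changed: Instead of formatting up to 16M candidate colors and testing each against the palette tuple, B parses the exact lowercase '#xxxxxx' entries into an integer set once, restricts it to the searched range, sorts it, and reads the first gap in the consecutive run (mex from 0, or max-excludant from 0xffffff); Pre_ excludes the inputs where A raises its no-color-left Exception.
import Mathlib
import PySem

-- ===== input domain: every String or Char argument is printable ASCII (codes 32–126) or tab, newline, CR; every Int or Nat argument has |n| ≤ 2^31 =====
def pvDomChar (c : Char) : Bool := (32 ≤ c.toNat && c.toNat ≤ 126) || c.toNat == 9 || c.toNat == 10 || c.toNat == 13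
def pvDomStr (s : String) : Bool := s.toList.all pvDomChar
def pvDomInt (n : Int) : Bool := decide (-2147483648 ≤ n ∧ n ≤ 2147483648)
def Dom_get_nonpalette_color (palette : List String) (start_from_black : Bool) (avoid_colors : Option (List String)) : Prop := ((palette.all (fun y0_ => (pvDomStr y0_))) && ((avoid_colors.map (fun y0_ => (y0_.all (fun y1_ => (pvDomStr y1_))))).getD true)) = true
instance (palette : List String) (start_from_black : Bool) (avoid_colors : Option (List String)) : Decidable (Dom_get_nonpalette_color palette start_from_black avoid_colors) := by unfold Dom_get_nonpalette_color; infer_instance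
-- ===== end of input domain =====

-- B replaces A's scan over up to 16M formatted candidate colors by a sort-then-gap-scan: parse the
-- palette entries into integers once, sort the in-range ones, and read the first gap in the
-- consecutive run; equal wherever A returns (Pre_ excludes exactly the inputs on which A raises).

-- ===== PORT A =====
-- formatting helper: "#{0:06x}".format i — exact for i ≤ 0xffffff (6 lowercase hex digits)
def pvHexChars : List Char := ['0','1','2','3','4','5','6','7','8','9','a','b','c','d','e','f']
def hdig (d : Nat) : Char := pvHexChars.getD d '0'

def hex6 (i : Nat) : String :=
  String.ofList ['#', hdig (i / 1048576 % 16), hdig (i / 65536 % 16), hdig (i / 4096 % 16),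
             hdig (i / 256 % 16), hdig (i / 16 % 16), hdig (i % 16)]

-- 'for i in range(0xffffff): …' — first color not in the palette; "" where Python raises (excluded by Pre_)
def aScanUp (pal : List String) (i : Nat) : String :=
  if _h : i < 16777215 then
    let color := hex6 i
    if color ∈ pal then aScanUp pal (i + 1) else color
  else ""
termination_by 16777215 - i

-- 'for i in range(0xffffff, 0, -1): …'
def aScanDown (pal : List String) (i : Nat) : String :=
  if _h : 0 < i then
    let color := hex6 i
    if color ∈ pal then aScanDown pal (i - 1) else color
  else ""
termination_by i

def get_nonpalette_color (palette : List String) (start_from_black : Bool) (avoid_colors : Option (List String)) : String :=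
  let final_palette := match avoid_colors with
    | none => palette
    | some av => palette ++ av
  if start_from_black then aScanUp final_palette 0 else aScanDown final_palette 16777215

-- ===== PORT B =====
-- value of an exact lowercase '#xxxxxx' 6-hex-digit string, else none (the entry-parsing loop's test)
def pdig (c : Char) : Option Nat := pvHexChars.idxOf? c

def pvParse? (s : String) : Option Nat :=
  match s.toList with
  | ['#', c1, c2, c3, c4, c5, c6] =>
    match pdig c1, pdig c2, pdig c3, pdig c4, pdig c5, pdig c6 with
    | some a, some b, some c, some d, some e, some f =>
        some (((((a * 16 + b) * 16 + c) * 16 + d) * 16 + e) * 16 + f)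
    | _, _, _, _, _, _ => none
  | _ => none

-- 'for v in taken: if v != expected: break; expected += 1'
def gapUp (taken : List Nat) (expected : Nat) : Nat :=
  match taken with
  | [] => expected
  | v :: rest => if v = expected then gapUp rest (expected + 1) else expected

-- the reverse-sorted twin: 'expected -= 1'
def gapDown (taken : List Nat) (expected : Nat) : Nat :=
  match taken with
  | [] => expected
  | v :: rest => if v = expected then gapDown rest (expected - 1) else expected

def get_nonpalette_color_alt (palette : List String) (start_from_black : Bool) (avoid_colors : Option (List String)) : String :=
  let entries := match avoid_colors with | none => palette | some av => palette ++ av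
  let occupied : PySem.Set Nat := PySem.Set.ofList (entries.filterMap pvParse?)
  if start_from_black then
    let taken := PySem.List.sorted (occupied.filter (fun v => decide (v ≤ 16777214))) (fun x => x) false
    let expected := gapUp taken 0
    if expected ≤ 16777214 then hex6 expected else ""
  else
    let taken := PySem.List.sorted (occupied.filter (fun v => decide (1 ≤ v))) (fun x => x) true
    let expected := gapDown taken 16777215
    if 1 ≤ expected then hex6 expected else ""

-- ===== PRECONDITION & SPEC =====
-- an entry blocks a candidate iff it is an exact lowercase 6-hex-digit color inside the scanned range
def pvBlocksUp (s : String) : Bool :=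
  match pvParse? s with | some v => v < 16777215 | none => false

def pvBlocksDown (s : String) : Bool :=
  match pvParse? s with | some v => 0 < v | none => false

-- Pre_: A returns normally iff the distinct in-range palette/avoid colors do not cover the whole
-- scanned range (0x000000–0xfffffe from black, 0x000001–0xffffff from white); A raises exactly otherwise.
def Pre_get_nonpalette_color (palette : List String) (start_from_black : Bool) (avoid_colors : Option (List String)) : Prop :=
  let final := palette ++ (match avoid_colors with | none => [] | some av => av)
  (PySem.Set.ofList (final.filter (if start_from_black then pvBlocksUp else pvBlocksDown))).length < 16777215

instance (palette : List String) (start_from_black : Bool) (avoid_colors : Option (List String)) : Decidable (Pre_get_nonpalette_color palette start_from_black avoid_colors) := by unfold Pre_get_nonpalette_color; infer_instance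

def pvWitness_get_nonpalette_color : List String × Bool × Option (List String) := (["#000000"], true, some ["#000001"])

def Spec_get_nonpalette_color (palette : List String) (start_from_black : Bool) (avoid_colors : Option (List String)) (out : String) : Prop := out = get_nonpalette_color_alt palette start_from_black avoid_colors
instance (palette : List String) (start_from_black : Bool) (avoid_colors : Option (List String)) (out : String) : Decidable (Spec_get_nonpalette_color palette start_from_black avoid_colors out) := by unfold Spec_get_nonpalette_color; infer_instance

-- ===== CLAIM (what is proved, stated in full; the proofs are below) =====
def Claim_equal_get_nonpalette_color : Prop := ∀ (palette : List String) (start_from_black : Bool) (avoid_colors : Option (List String)), Dom_get_nonpalette_color palette start_from_black avoid_colors → Pre_get_nonpalette_color palette start_from_black avoid_colors → Spec_get_nonpalette_color palette start_from_black avoid_colors (get_nonpalette_color palette start_from_black avoid_colors)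

-- ===== LEMMAS AND PROOFS =====

theorem pdig_hdig : ∀ d < 16, pdig (hdig d) = some d := by decide

theorem pdig_some {c : Char} {d : Nat} (h : pdig c = some d) : d < 16 ∧ hdig d = c := by
  obtain ⟨hlt, heq, -⟩ := List.idxOf?_eq_some_iff.mp h
  have h16 : d < 16 := by simpa [pvHexChars] using hlt
  exact ⟨h16, by rw [hdig, List.getD_eq_getElem _ _ hlt, heq]⟩

theorem parse_hex6 {i : Nat} (h : i < 16777216) : pvParse? (hex6 i) = some i := by
  have h16 : ∀ j : Nat, j % 16 < 16 := fun j => Nat.mod_lt _ (by omega)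
  unfold pvParse? hex6
  rw [String.toList_ofList]
  simp only [pdig_hdig _ (h16 _)]
  congr 1
  omega

theorem hex6_canon {s : String} {v : Nat} (h : pvParse? s = some v) : s = hex6 v ∧ v < 16777216 := by
  unfold pvParse? at h
  split at h
  case h_2 => exact absurd h (by simp)
  case h_1 c1 c2 c3 c4 c5 c6 heq =>
    split at h
    case h_2 => exact absurd h (by simp)
    case h_1 a b c d e f ha hb hc hd he hf =>
      obtain ⟨ha16, ha'⟩ := pdig_some ha
      obtain ⟨hb16, hb'⟩ := pdig_some hb
      obtain ⟨hc16, hc'⟩ := pdig_some hc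
      obtain ⟨hd16, hd'⟩ := pdig_some hd
      obtain ⟨he16, he'⟩ := pdig_some he
      obtain ⟨hf16, hf'⟩ := pdig_some hf
      injection h with hv
      have hvlt : v < 16777216 := by omega
      refine ⟨?_, hvlt⟩
      have hs : s = String.ofList s.toList := String.ofList_toList.symm
      rw [hs, heq]
      unfold hex6
      have e5 : v / 1048576 % 16 = a := by omega
      have e4 : v / 65536 % 16 = b := by omega
      have e3 : v / 4096 % 16 = c := by omega
      have e2 : v / 256 % 16 = d := by omega
      have e1 : v / 16 % 16 = e := by omega
      have e0 : v % 16 = f := by omega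
      rw [e5, e4, e3, e2, e1, e0, ha', hb', hc', hd', he', hf']

theorem bridge {entries : List String} {i : Nat} (hi : i < 16777216) :
    hex6 i ∈ entries ↔ i ∈ entries.filterMap pvParse? := by
  constructor
  · intro hm
    exact List.mem_filterMap.mpr ⟨hex6 i, hm, parse_hex6 hi⟩
  · intro hm
    obtain ⟨s, hs, hp⟩ := List.mem_filterMap.mp hm
    rw [(hex6_canon hp).1] at hs
    exact hs

theorem hex6_inj {i j : Nat} (hi : i < 16777216) (hj : j < 16777216) (h : hex6 i = hex6 j) : i = j := by
  have h1 := parse_hex6 hi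
  rw [h, parse_hex6 hj] at h1
  exact (Option.some.inj h1).symm

theorem scanUp_eq (pal : List String) (j0 : Nat) (hj : j0 < 16777215)
    (hfree : hex6 j0 ∉ pal) (hblk : ∀ m, m < j0 → hex6 m ∈ pal) :
    ∀ k, k ≤ j0 → aScanUp pal k = hex6 j0 := by
  intro k hk
  induction hd : (j0 - k) generalizing k with
  | zero =>
    have hkj : k = j0 := by omega
    subst hkj
    rw [aScanUp]
    simp [hj, hfree]
  | succ n ih =>
    have hk' : k < j0 := by omega
    rw [aScanUp]
    simp only [show k < 16777215 by omega, dite_true, hblk k hk', if_pos]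
    exact ih (k + 1) (by omega) (by omega)

theorem scanDown_eq (pal : List String) (j0 : Nat) (hj : 0 < j0)
    (hfree : hex6 j0 ∉ pal) (hblk : ∀ m, j0 < m → m ≤ 16777215 → hex6 m ∈ pal) :
    ∀ k, j0 ≤ k → k ≤ 16777215 → aScanDown pal k = hex6 j0 := by
  intro k hk hk2
  induction hd : (k - j0) generalizing k with
  | zero =>
    have hkj : k = j0 := by omega
    subst hkj
    rw [aScanDown]
    simp [hj, hfree]
  | succ n ih =>
    have hk' : j0 < k := by omega
    rw [aScanDown]
    simp only [show 0 < k by omega, dite_true, hblk k hk' hk2, if_pos]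
    exact ih (k - 1) (by omega) (by omega) (by omega)

-- gap scan over a strictly increasing list: returns the least value ≥ e missing from taken,
-- given that everything in [e, j0) is present, j0 is absent and all elements are ≥ e
theorem gapUp_eq (taken : List Nat) (j0 : Nat) :
    taken.Pairwise (· < ·) → ∀ e, e ≤ j0 → j0 ∉ taken →
    (∀ m, e ≤ m → m < j0 → m ∈ taken) → (∀ v ∈ taken, e ≤ v) →
    gapUp taken e = j0 := by
  induction taken with
  | nil =>
    intro _ e he hfree hblk _
    have : e = j0 := by
      by_contra hne
      exact absurd (hblk e le_rfl (by omega)) (List.not_mem_nil)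
    simpa [gapUp] using this
  | cons v rest ih =>
    intro hpw e he hfree hblk hge
    rw [gapUp]
    by_cases hej : e = j0
    · subst hej
      have hv : v ≠ e := fun h => hfree (h ▸ List.mem_cons_self)
      simp [hv]
    · have helt : e < j0 := by omega
      have hemem : e ∈ v :: rest := hblk e le_rfl helt
      have hve : v = e := by
        rcases List.mem_cons.mp hemem with h | h
        · exact h.symm
        · have := (List.pairwise_cons.mp hpw).1 e h
          have := hge v List.mem_cons_self
          omega
      subst hve
      rw [if_pos rfl]
      refine ih (List.pairwise_cons.mp hpw).2 (v + 1) (by omega)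
        (fun h => hfree (List.mem_cons_of_mem _ h)) ?_ ?_
      · intro m hm1 hm2
        rcases List.mem_cons.mp (hblk m (by omega) hm2) with h | h
        · omega
        · exact h
      · intro x hx
        have := (List.pairwise_cons.mp hpw).1 x hx
        omega

theorem gapDown_eq (taken : List Nat) (j0 : Nat) :
    taken.Pairwise (· > ·) → ∀ e, j0 ≤ e → j0 ∉ taken →
    (∀ m, j0 < m → m ≤ e → m ∈ taken) → (∀ v ∈ taken, v ≤ e) →
    gapDown taken e = j0 := by
  induction taken with
  | nil =>
    intro _ e he hfree hblk _
    have : e = j0 := by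
      by_contra hne
      exact absurd (hblk e (by omega) le_rfl) (List.not_mem_nil)
    simpa [gapDown] using this
  | cons v rest ih =>
    intro hpw e he hfree hblk hle
    rw [gapDown]
    by_cases hej : e = j0
    · subst hej
      have hv : v ≠ e := fun h => hfree (h ▸ List.mem_cons_self)
      simp [hv]
    · have helt : j0 < e := by omega
      have hemem : e ∈ v :: rest := hblk e helt le_rfl
      have hve : v = e := by
        rcases List.mem_cons.mp hemem with h | h
        · exact h.symm
        · have := (List.pairwise_cons.mp hpw).1 e h
          have := hle v List.mem_cons_self
          omega
      subst hve
      rw [if_pos rfl]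
      refine ih (List.pairwise_cons.mp hpw).2 (v - 1) (by omega)
        (fun h => hfree (List.mem_cons_of_mem _ h)) ?_ ?_
      · intro m hm1 hm2
        rcases List.mem_cons.mp (hblk m hm1 (by omega)) with h | h
        · omega
        · exact h
      · intro x hx
        have := (List.pairwise_cons.mp hpw).1 x hx
        omega

theorem sorted_filter_lt (occ : List Nat) (hond : occ.Nodup) (p : Nat → Bool) :
    (PySem.List.sorted (occ.filter p) (fun x => x) false).Pairwise (· < ·) := by
  have hnd : (PySem.List.sorted (occ.filter p) (fun x => x) false).Nodup :=
    (PySem.List.sorted_perm (occ.filter p) (fun x => x) false).nodup_iff.mpr (hond.filter p)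
  have hle := PySem.List.sorted_pairwise (occ.filter p) (fun x => x)
  exact (hle.and hnd).imp (fun h => lt_of_le_of_ne h.1 h.2)

theorem sorted_filter_gt (occ : List Nat) (hond : occ.Nodup) (p : Nat → Bool) :
    (PySem.List.sorted (occ.filter p) (fun x => x) true).Pairwise (· > ·) := by
  have hnd : (PySem.List.sorted (occ.filter p) (fun x => x) true).Nodup :=
    (PySem.List.sorted_perm (occ.filter p) (fun x => x) true).nodup_iff.mpr (hond.filter p)
  have hge := PySem.List.sorted_pairwise_rev (occ.filter p) (fun x => x)
  exact (hge.and hnd).imp (fun h => lt_of_le_of_ne h.1 (Ne.symm h.2))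

theorem occ_lt (entries : List String) {v : Nat}
    (h : v ∈ (PySem.Set.ofList (entries.filterMap pvParse?) : List Nat)) : v < 16777216 := by
  rw [PySem.Set.mem_ofList] at h
  obtain ⟨s, _, hp⟩ := List.mem_filterMap.mp h
  exact (hex6_canon hp).2

theorem black_eq (final : List String)
    (hpre : (PySem.Set.ofList (final.filter pvBlocksUp)).length < 16777215) :
    aScanUp final 0 =
      (let occ : PySem.Set Nat := PySem.Set.ofList (final.filterMap pvParse?)
       let taken := PySem.List.sorted (occ.filter (fun v => decide (v ≤ 16777214))) (fun x => x) false
       let expected := gapUp taken 0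
       if expected ≤ 16777214 then hex6 expected else "") := by
  set occ : PySem.Set Nat := PySem.Set.ofList (final.filterMap pvParse?) with hocc
  set taken := PySem.List.sorted (occ.filter (fun v => decide (v ≤ 16777214))) (fun x => x) false with htk
  have hex_free : ∃ j, j < 16777215 ∧ hex6 j ∉ final := by
    by_contra hc
    push Not at hc
    have hsub : (List.range 16777215).map hex6 ⊆ PySem.Set.ofList (final.filter pvBlocksUp) := by
      intro x hx
      obtain ⟨j, hjmem, rfl⟩ := List.mem_map.mp hx
      have hjlt : j < 16777215 := List.mem_range.mp hjmem
      rw [PySem.Set.mem_ofList]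
      refine List.mem_filter.mpr ⟨hc j hjlt, ?_⟩
      unfold pvBlocksUp
      rw [parse_hex6 (by omega)]
      simpa using hjlt
    have hnd : ((List.range 16777215).map hex6).Nodup :=
      List.Nodup.map_on
        (fun x hx y hy hxy =>
          hex6_inj (by have := List.mem_range.mp hx; omega)
            (by have := List.mem_range.mp hy; omega) hxy)
        List.nodup_range
    have hle := (hnd.subperm hsub).length_le
    simp at hle
    omega
  have hspec := Nat.find_spec hex_free
  set j0 := Nat.find hex_free with hj0def
  obtain ⟨hj0lt, hj0free⟩ := hspec
  have hmin : ∀ m, m < j0 → hex6 m ∈ final := by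
    intro m hm
    by_contra hnm
    exact Nat.find_min hex_free hm ⟨by omega, hnm⟩
  have htk_iff : ∀ m, m < 16777215 → (m ∈ taken ↔ hex6 m ∈ final) := by
    intro m hm
    rw [htk, PySem.List.mem_sorted, List.mem_filter, hocc, PySem.Set.mem_ofList]
    constructor
    · intro ⟨h1, _⟩; exact (bridge (by omega)).mpr h1
    · intro h; exact ⟨(bridge (by omega)).mp h, by simp; omega⟩
  have hjtk : j0 ∉ taken := fun h => hj0free ((htk_iff j0 hj0lt).mp h)
  have hblk : ∀ m, 0 ≤ m → m < j0 → m ∈ taken := fun m _ hm =>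
    (htk_iff m (by omega)).mpr (hmin m hm)
  have hgap : gapUp taken 0 = j0 :=
    gapUp_eq taken j0 (sorted_filter_lt occ (hocc ▸ PySem.Set.nodup_ofList _) _) 0 (by omega) hjtk hblk (fun v _ => Nat.zero_le v)
  show aScanUp final 0 = (if gapUp taken 0 ≤ 16777214 then hex6 (gapUp taken 0) else "")
  rw [scanUp_eq final j0 hj0lt hj0free hmin 0 (by omega), hgap, if_pos (by omega)]

theorem white_eq (final : List String)
    (hpre : (PySem.Set.ofList (final.filter pvBlocksDown)).length < 16777215) :
    aScanDown final 16777215 =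
      (let occ : PySem.Set Nat := PySem.Set.ofList (final.filterMap pvParse?)
       let taken := PySem.List.sorted (occ.filter (fun v => decide (1 ≤ v))) (fun x => x) true
       let expected := gapDown taken 16777215
       if 1 ≤ expected then hex6 expected else "") := by
  set occ : PySem.Set Nat := PySem.Set.ofList (final.filterMap pvParse?) with hocc
  set taken := PySem.List.sorted (occ.filter (fun v => decide (1 ≤ v))) (fun x => x) true with htk
  have hex_free : ∃ d, d < 16777215 ∧ hex6 (16777215 - d) ∉ final := by
    by_contra hc
    push Not at hc
    have hsub : (List.range 16777215).map (fun d => hex6 (16777215 - d)) ⊆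
        PySem.Set.ofList (final.filter pvBlocksDown) := by
      intro x hx
      obtain ⟨d, hdmem, rfl⟩ := List.mem_map.mp hx
      have hdlt : d < 16777215 := List.mem_range.mp hdmem
      rw [PySem.Set.mem_ofList]
      refine List.mem_filter.mpr ⟨hc d hdlt, ?_⟩
      unfold pvBlocksDown
      rw [parse_hex6 (by omega)]
      simp
      omega
    have hnd : ((List.range 16777215).map (fun d => hex6 (16777215 - d))).Nodup :=
      List.Nodup.map_on
        (fun x hx y hy hxy => by
          have hx' := List.mem_range.mp hx
          have hy' := List.mem_range.mp hy
          have := hex6_inj (i := 16777215 - x) (j := 16777215 - y) (by omega) (by omega) hxy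
          omega)
        List.nodup_range
    have hle := (hnd.subperm hsub).length_le
    simp at hle
    omega
  have hspec := Nat.find_spec hex_free
  set d0 := Nat.find hex_free with hd0def
  obtain ⟨hd0lt, hd0free⟩ := hspec
  set j0 := 16777215 - d0 with hj0def
  have hj0pos : 0 < j0 := by omega
  have hj0free : hex6 j0 ∉ final := hd0free
  have hblkf : ∀ m, j0 < m → m ≤ 16777215 → hex6 m ∈ final := by
    intro m hm1 hm2
    by_contra hnm
    have hd : 16777215 - m < d0 := by omega
    refine Nat.find_min hex_free hd ⟨by omega, ?_⟩
    have : 16777215 - (16777215 - m) = m := by omega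
    rw [this]
    exact hnm
  have htk_iff : ∀ m, 1 ≤ m → m ≤ 16777215 → (m ∈ taken ↔ hex6 m ∈ final) := by
    intro m hm1 hm2
    rw [htk, PySem.List.mem_sorted, List.mem_filter, hocc, PySem.Set.mem_ofList]
    constructor
    · intro ⟨h1, _⟩; exact (bridge (by omega)).mpr h1
    · intro h; exact ⟨(bridge (by omega)).mp h, by simp; omega⟩
  have hjtk : j0 ∉ taken := fun h => hj0free ((htk_iff j0 hj0pos (by omega)).mp h)
  have hblk : ∀ m, j0 < m → m ≤ 16777215 → m ∈ taken := fun m h1 h2 =>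
    (htk_iff m (by omega) h2).mpr (hblkf m h1 h2)
  have hle : ∀ v ∈ taken, v ≤ 16777215 := by
    intro v hv
    rw [htk, PySem.List.mem_sorted, List.mem_filter] at hv
    have := occ_lt final hv.1
    omega
  have hgap : gapDown taken 16777215 = j0 :=
    gapDown_eq taken j0 (sorted_filter_gt occ (hocc ▸ PySem.Set.nodup_ofList _) _) 16777215 (by omega) hjtk hblk hle
  show aScanDown final 16777215 = (if 1 ≤ gapDown taken 16777215 then hex6 (gapDown taken 16777215) else "")
  rw [scanDown_eq final j0 hj0pos hj0free hblkf 16777215 (by omega) (by omega), hgap,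
      if_pos (by omega)]

-- ===== VERDICT (by name: the statement is the Claim_ definition above) =====
theorem get_nonpalette_color_spec : Claim_equal_get_nonpalette_color := by
  intro palette sfb avoid _hdom hpre
  unfold Pre_get_nonpalette_color at hpre
  unfold Spec_get_nonpalette_color get_nonpalette_color get_nonpalette_color_alt
  cases avoid with
  | none =>
    simp only [List.append_nil] at hpre ⊢
    cases sfb with
    | true => simp only [reduceIte] at hpre ⊢; exact black_eq palette hpre
    | false => simp only [Bool.false_eq_true, reduceIte] at hpre ⊢; exact white_eq palette hpre
  | some av =>
    cases sfb with
    | true => simp only [reduceIte] at hpre ⊢; exact black_eq (palette ++ av) hpre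
    | false => simp only [Bool.false_eq_true, reduceIte] at hpre ⊢; exact white_eq (palette ++ av) hpre
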